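-- pv_equiv track=rewrite | github.com/RahulRanjan-Dev/pythoncode | Python_code/List_count.py | count_doctors_working_multiple_hospitals
-- ===== SOURCE A (Python) =====
-- def count_doctors_working_multiple_hospitals(A):
--     doctor_counts = {}
--     for hospital_schedule in A:
--         for doctor_id in set(hospital_schedule):
--             if doctor_id in doctor_counts:
--                 doctor_counts[doctor_id] += 1
--             else:
--                 doctor_counts[doctor_id] = 1
--
--     num_doctors_working_multiple_hospitals = sum(count > 1 for count in doctor_counts.values())
--
--     return num_doctors_working_multiple_hospitals
-- ===== SOURCE B (Python) =====
-- def count_doctors_working_multiple_hospitals(A):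
--     hospital_sets = [set(hospital_schedule) for hospital_schedule in A]
--     all_doctors = set()
--     for s in hospital_sets:
--         all_doctors |= s
--     return sum(1 for doctor_id in all_doctors
--                if sum(1 for s in hospital_sets if doctor_id in s) > 1)
-- ===== Notes on version B (the rewrite author's own statement) =====
-- stated objective: alternative
-- what changed: Replaces A's single-pass incremental count dict plus final aggregation over its values by a two-stage brute-force scan: precompute per-hospital sets and their union, then for each distinct doctor count its hospitals by direct membership tests across all hospital sets, maintaining no running counts.
import Mathlib
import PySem

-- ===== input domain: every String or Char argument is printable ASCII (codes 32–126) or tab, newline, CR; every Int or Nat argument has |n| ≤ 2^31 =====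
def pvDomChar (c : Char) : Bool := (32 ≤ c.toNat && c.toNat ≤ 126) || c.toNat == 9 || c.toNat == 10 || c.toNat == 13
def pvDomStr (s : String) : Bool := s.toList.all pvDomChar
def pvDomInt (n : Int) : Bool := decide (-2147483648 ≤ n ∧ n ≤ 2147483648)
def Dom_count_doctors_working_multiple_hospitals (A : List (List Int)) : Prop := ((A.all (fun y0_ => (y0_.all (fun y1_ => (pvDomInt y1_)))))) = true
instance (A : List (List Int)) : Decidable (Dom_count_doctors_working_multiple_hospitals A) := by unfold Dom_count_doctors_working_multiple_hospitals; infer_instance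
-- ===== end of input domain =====

-- B replaces A's incremental count dict + final aggregation by a two-stage scan: per-hospital
-- sets, their union, then per-doctor membership counting across all hospital sets (objective: alternative).

-- ===== PORT A =====
-- one inner-loop step of A: count the doctor in the dict
def pvStepA (d : PySem.Dict Int Int) (x : Int) : PySem.Dict Int Int :=
  if d.contains x then d.insert x (d.getD x 0 + 1) else d.insert x 1

def count_doctors_working_multiple_hospitals (A : List (List Int)) : Int :=
  ((A.foldl (fun d hs => (PySem.Set.ofList hs).foldl pvStepA d) PySem.Dict.empty).values.map
    (fun v => if 1 < v then (1 : Int) else 0)).sum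

-- ===== PORT B =====
-- hospital_sets (= A.map Set.ofList) is written out at each of its two uses
def count_doctors_working_multiple_hospitals_alt (A : List (List Int)) : Int :=
  ((((A.map (fun hs => PySem.Set.ofList hs)).foldl (fun acc s => PySem.Set.union acc s) PySem.Set.empty).countP
      (fun doc => decide (1 < (((A.map (fun hs => PySem.Set.ofList hs)).countP (fun s => PySem.Set.contains s doc) : Nat) : Int)))) : Int)

-- ===== PRECONDITION & SPEC =====
def Spec_count_doctors_working_multiple_hospitals (A : List (List Int)) (out : Int) : Prop := out = count_doctors_working_multiple_hospitals_alt A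
instance (A : List (List Int)) (out : Int) : Decidable (Spec_count_doctors_working_multiple_hospitals A out) := by unfold Spec_count_doctors_working_multiple_hospitals; infer_instance

-- ===== CLAIM (what is proved, stated in full; the proofs are below) =====
def Claim_equal_count_doctors_working_multiple_hospitals : Prop := ∀ (A : List (List Int)), Dom_count_doctors_working_multiple_hospitals A → Spec_count_doctors_working_multiple_hospitals A (count_doctors_working_multiple_hospitals A)

-- ===== LEMMAS AND PROOFS =====

-- the number of hospitals of A that contain doctor y
def pvCnt (A : List (List Int)) (y : Int) : Nat := A.countP (fun h => decide (y ∈ h))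

theorem pvStepA_getD (d : PySem.Dict Int Int) (x y : Int) :
    (pvStepA d x).getD y 0 = if y = x then d.getD y 0 + 1 else d.getD y 0 := by
  unfold pvStepA
  by_cases hc : d.contains x = true
  · rw [if_pos hc, PySem.Dict.getD_insert]
    by_cases he : y = x
    · subst he; simp
    · simp [he]
  · rw [if_neg hc, PySem.Dict.getD_insert]
    by_cases he : y = x
    · subst he
      rw [if_pos rfl, if_pos rfl, PySem.Dict.getD_of_not_contains d 0 (by simpa using hc)]
      norm_num
    · simp [he]

theorem pvStepA_nodup (d : PySem.Dict Int Int) (x : Int) (h : d.keys.Nodup) :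
    (pvStepA d x).keys.Nodup := by
  unfold pvStepA; split_ifs <;> exact PySem.Dict.nodup_keys_insert _ _ _ h

theorem pvFoldInner_nodup (l : List Int) (d : PySem.Dict Int Int) (h : d.keys.Nodup) :
    (l.foldl pvStepA d).keys.Nodup := by
  induction l generalizing d with
  | nil => exact h
  | cons x t ih => exact ih _ (pvStepA_nodup d x h)

theorem pvFoldInner_getD (l : List Int) (hl : l.Nodup) (d : PySem.Dict Int Int) (y : Int) :
    (l.foldl pvStepA d).getD y 0 = d.getD y 0 + (if y ∈ l then 1 else 0) := by
  induction l generalizing d with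
  | nil => simp
  | cons x t ih =>
    obtain ⟨hx, ht⟩ := List.nodup_cons.mp hl
    rw [List.foldl_cons, ih ht, pvStepA_getD]
    by_cases he : y = x
    · subst he
      have : y ∉ t := hx
      simp [this]
    · simp [he, List.mem_cons]

theorem pvFoldOuter_nodup (A : List (List Int)) (d : PySem.Dict Int Int) (h : d.keys.Nodup) :
    (A.foldl (fun d hs => (PySem.Set.ofList hs).foldl pvStepA d) d).keys.Nodup := by
  induction A generalizing d with
  | nil => exact h
  | cons hs t ih => exact ih _ (pvFoldInner_nodup _ d h)

theorem pvFoldOuter_getD (A : List (List Int)) (d : PySem.Dict Int Int) (y : Int) :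
    (A.foldl (fun d hs => (PySem.Set.ofList hs).foldl pvStepA d) d).getD y 0
      = d.getD y 0 + (pvCnt A y : Int) := by
  induction A generalizing d with
  | nil => simp [pvCnt]
  | cons hs t ih =>
    rw [List.foldl_cons, ih, pvFoldInner_getD _ (PySem.Set.nodup_ofList hs)]
    have hmem : y ∈ PySem.Set.ofList hs ↔ y ∈ hs := PySem.Set.mem_ofList hs y
    unfold pvCnt
    rw [List.countP_cons]
    by_cases hy : y ∈ hs
    · simp [hmem, hy]; ring
    · simp [hmem, hy]

-- final aggregation: A's 0/1-sum over the dict values is the length of any nodup list whose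
-- members are exactly the keys with value > 1
theorem pvCount_eq (d : PySem.Dict Int Int) (s : List Int)
    (hk : d.keys.Nodup) (hs : s.Nodup) (hmem : ∀ y, y ∈ s ↔ 2 ≤ d.getD y 0) :
    (d.values.map (fun v => if 1 < v then (1 : Int) else 0)).sum = (s.length : Int) := by
  have hsum : (d.values.map (fun v => if 1 < v then (1 : Int) else 0)).sum
      = ((d.items.filter (fun q => decide (1 < q.2))).map (·.1)).length := by
    rw [show (fun v : Int => if 1 < v then (1 : Int) else 0)
        = fun v : Int => if decide (1 < v) = true then (1 : Int) else 0 by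
      funext v; simp]
    rw [PySem.List.sum_map_ite_one_zero]
    have : d.values = d.items.map (·.2) := rfl
    rw [this, List.countP_map, List.length_map, List.countP_eq_length_filter]
    rfl
  rw [hsum]
  set L := (d.items.filter (fun q => decide (1 < q.2))).map (·.1) with hL
  have hLsub : L.Sublist d.keys := List.Sublist.map _ List.filter_sublist
  have hLnodup : L.Nodup := hk.sublist hLsub
  have hmemL : ∀ y, y ∈ L ↔ 2 ≤ d.getD y 0 := by
    intro y
    constructor
    · intro hy
      rw [hL] at hy
      obtain ⟨q, hq, rfl⟩ := List.mem_map.mp hy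
      obtain ⟨hqi, hq2⟩ := List.mem_filter.mp hq
      have : d.get? q.1 = some q.2 :=
        (PySem.Dict.get?_eq_some_iff_mem_items d q.1 q.2 hk).mpr hqi
      rw [PySem.Dict.getD_eq_get?_getD, this]
      simpa using hq2
    · intro hy
      rw [PySem.Dict.getD_eq_get?_getD] at hy
      cases hget : d.get? y with
      | none => rw [hget] at hy; simp only [Option.getD_none] at hy; omega
      | some v =>
        rw [hget] at hy; simp only [Option.getD_some] at hy
        have hitem : (y, v) ∈ d.items :=
          (PySem.Dict.get?_eq_some_iff_mem_items d y v hk).mp hget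
        rw [hL]
        exact List.mem_map.mpr ⟨(y, v), List.mem_filter.mpr ⟨hitem, by simp only [decide_eq_true_eq]; omega⟩, rfl⟩
  have hperm : L.Perm s := (List.perm_ext_iff_of_nodup hLnodup hs).mpr (by
    intro y; rw [hmemL y, hmem y])
  rw [hperm.length_eq]

-- B's union accumulates exactly the doctors of some hospital, without duplicates
theorem pvUnion_nodup (l : List (PySem.Set Int)) (acc : PySem.Set Int) (h : acc.Nodup) :
    (l.foldl (fun acc s => PySem.Set.union acc s) acc).Nodup := by
  induction l generalizing acc with
  | nil => exact h
  | cons s t ih => exact ih _ (PySem.Set.nodup_union acc s h)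

theorem pvUnion_mem (l : List (PySem.Set Int)) (acc : PySem.Set Int) (y : Int) :
    y ∈ l.foldl (fun acc s => PySem.Set.union acc s) acc ↔ y ∈ acc ∨ ∃ s ∈ l, y ∈ s := by
  induction l generalizing acc with
  | nil => simp
  | cons s t ih =>
    rw [List.foldl_cons, ih, PySem.Set.mem_union]
    constructor
    · rintro ((h | h) | ⟨u, hu, hy⟩)
      · exact Or.inl h
      · exact Or.inr ⟨s, List.mem_cons_self, h⟩
      · exact Or.inr ⟨u, List.mem_cons_of_mem _ hu, hy⟩
    · rintro (h | ⟨u, hu, hy⟩)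
      · exact Or.inl (Or.inl h)
      · rcases List.mem_cons.mp hu with rfl | hu
        · exact Or.inl (Or.inr hy)
        · exact Or.inr ⟨u, hu, hy⟩

-- B's inner membership count equals pvCnt
theorem pvInnerCount (A : List (List Int)) (y : Int) :
    (A.map (fun hs => PySem.Set.ofList hs)).countP (fun s => PySem.Set.contains s y)
      = pvCnt A y := by
  rw [List.countP_map]
  apply List.countP_congr
  intro h _
  simp [Function.comp, PySem.Set.mem_ofList]

-- ===== VERDICT (by name: the statement is the Claim_ definition above) =====
theorem count_doctors_working_multiple_hospitals_spec : Claim_equal_count_doctors_working_multiple_hospitals := by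
  intro A _
  unfold Spec_count_doctors_working_multiple_hospitals
  unfold count_doctors_working_multiple_hospitals count_doctors_working_multiple_hospitals_alt
  set d := A.foldl (fun d hs => (PySem.Set.ofList hs).foldl pvStepA d) PySem.Dict.empty with hd
  set sets := A.map (fun hs => PySem.Set.ofList hs) with hsets
  set allD := sets.foldl (fun acc s => PySem.Set.union acc s) PySem.Set.empty with hall
  have hk : d.keys.Nodup := pvFoldOuter_nodup A _ PySem.Dict.nodup_keys_empty
  have hgetD : ∀ y, d.getD y 0 = (pvCnt A y : Int) := by
    intro y; rw [hd, pvFoldOuter_getD]; simp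
  have hpred : ∀ y : Int,
      decide (1 < ((sets.countP (fun s => PySem.Set.contains s y) : Nat) : Int))
        = decide (2 ≤ pvCnt A y) := by
    intro y
    rw [hsets, pvInnerCount]
    simp only [decide_eq_decide]
    omega
  set s := allD.filter (fun doc => decide (1 < ((sets.countP (fun s => PySem.Set.contains s doc) : Nat) : Int))) with hsdef
  have hcount : (allD.countP
      (fun doc => decide (1 < ((sets.countP (fun s => PySem.Set.contains s doc) : Nat) : Int)))) = s.length := by
    rw [hsdef, List.countP_eq_length_filter]
  rw [hcount]
  have hallNodup : allD.Nodup := pvUnion_nodup sets PySem.Set.empty List.nodup_nil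
  have hsNodup : s.Nodup := hallNodup.filter _
  apply pvCount_eq d s hk hsNodup
  intro y
  rw [hsdef, List.mem_filter, hpred y, hgetD y]
  constructor
  · rintro ⟨-, h2⟩
    have : 2 ≤ pvCnt A y := of_decide_eq_true h2
    exact_mod_cast this
  · intro h2
    have hc : 2 ≤ pvCnt A y := by exact_mod_cast h2
    refine ⟨?_, decide_eq_true hc⟩
    rw [hall, pvUnion_mem]
    right
    have hpos : 0 < A.countP (fun h => decide (y ∈ h)) := by unfold pvCnt at hc; omega
    obtain ⟨h, hmem, hy⟩ := List.countP_pos_iff.mp hpos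
    exact ⟨PySem.Set.ofList h, by rw [hsets]; exact List.mem_map_of_mem hmem,
      (PySem.Set.mem_ofList h y).mpr (of_decide_eq_true hy)⟩
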